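-- pv_equiv track=rewrite | github.com/Kiyonda69/CAC_Part_1 | scripts/verify_34.py | compute_views
-- ===== SOURCE A (Python) =====
-- def compute_views(grid, n):
--     """3Dグリッドから正面図・右側面図・上面図を計算"""
--     front = [[0]*n for _ in range(n)]  # F[x][z]
--     right = [[0]*n for _ in range(n)]  # R[y][z]
--     top   = [[0]*n for _ in range(n)]  # T[x][y]
--
--     for x in range(n):
--         for y in range(n):
--             for z in range(n):
--                 if grid[x][y][z]:
--                     front[x][z] = 1
--                     right[y][z] = 1
--                     top[x][y] = 1
--     return front, right, top
-- ===== SOURCE B (Python) =====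
-- def compute_views(grid, n):
--     """3Dグリッドから正面図・右側面図・上面図を計算"""
--     front = [[1 if any(grid[x][y][z] for y in range(n)) else 0
--               for z in range(n)] for x in range(n)]
--     right = [[1 if any(grid[x][y][z] for x in range(n)) else 0
--               for z in range(n)] for y in range(n)]
--     top = [[1 if any(grid[x][y][z] for z in range(n)) else 0
--             for y in range(n)] for x in range(n)]
--     return front, right, top
-- ===== Notes on version B (the rewrite author's own statement) =====
-- stated objective: alternative
-- what changed: Replaces the single fused triple loop that mutates three matrices with three independent comprehensions, each building one projection directly by collapsing its own axis with any().
import Mathlib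
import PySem

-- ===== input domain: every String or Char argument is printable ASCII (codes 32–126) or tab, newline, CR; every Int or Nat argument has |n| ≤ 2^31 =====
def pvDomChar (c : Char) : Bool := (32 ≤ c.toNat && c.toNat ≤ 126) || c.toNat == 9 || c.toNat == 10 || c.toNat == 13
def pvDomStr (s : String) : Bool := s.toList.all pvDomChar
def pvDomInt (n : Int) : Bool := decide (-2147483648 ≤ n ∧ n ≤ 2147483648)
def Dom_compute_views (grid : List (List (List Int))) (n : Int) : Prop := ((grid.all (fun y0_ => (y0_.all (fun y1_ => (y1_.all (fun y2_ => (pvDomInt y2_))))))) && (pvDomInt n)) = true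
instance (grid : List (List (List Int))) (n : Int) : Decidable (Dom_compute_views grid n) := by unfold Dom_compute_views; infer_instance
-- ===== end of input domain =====

-- B replaces A's fused triple loop (one traversal mutating all three matrices) with three
-- independent per-projection builds, each collapsing one axis with any(); same cost, different shape.

-- ===== PORT A =====
-- grid[x][y][z]: under Pre_ every access is in range, so the .getD 0 default is never used.
def pvGet3 (grid : List (List (List Int))) (x y z : Int) : Int :=
  ((((PySem.List.pyGet? grid x).bind (fun r => PySem.List.pyGet? r y)).bind
      (fun c => PySem.List.pyGet? c z)).getD 0)

-- mm[i][j] = 1 (the loop indices are always nonnegative and in range)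
def pvSet2 (mm : List (List Int)) (i j : Nat) : List (List Int) :=
  mm.set i ((mm.getD i []).set j 1)

def compute_views (grid : List (List (List Int))) (n : Int) : List (List Int) × List (List Int) × List (List Int) :=
  let front := List.replicate n.toNat (List.replicate n.toNat (0 : Int))
  let right := List.replicate n.toNat (List.replicate n.toNat (0 : Int))
  let top := List.replicate n.toNat (List.replicate n.toNat (0 : Int))
  (PySem.List.pyRange 0 n 1).foldl (fun s x =>
    (PySem.List.pyRange 0 n 1).foldl (fun s y =>
      (PySem.List.pyRange 0 n 1).foldl (fun s z =>
        if pvGet3 grid x y z ≠ 0 then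
          (pvSet2 s.1 x.toNat z.toNat, pvSet2 s.2.1 y.toNat z.toNat, pvSet2 s.2.2 x.toNat y.toNat)
        else s) s) s) (front, right, top)

-- ===== PORT B =====
def compute_views_alt (grid : List (List (List Int))) (n : Int) : List (List Int) × List (List Int) × List (List Int) :=
  let front := (PySem.List.pyRange 0 n 1).map (fun x =>
    (PySem.List.pyRange 0 n 1).map (fun z =>
      if (PySem.List.pyRange 0 n 1).any (fun y => pvGet3 grid x y z != 0) then (1 : Int) else 0))
  let right := (PySem.List.pyRange 0 n 1).map (fun y =>
    (PySem.List.pyRange 0 n 1).map (fun z =>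
      if (PySem.List.pyRange 0 n 1).any (fun x => pvGet3 grid x y z != 0) then (1 : Int) else 0))
  let top := (PySem.List.pyRange 0 n 1).map (fun x =>
    (PySem.List.pyRange 0 n 1).map (fun y =>
      if (PySem.List.pyRange 0 n 1).any (fun z => pvGet3 grid x y z != 0) then (1 : Int) else 0))
  (front, right, top)

-- ===== PRECONDITION & SPEC =====
-- Pre_ excludes exactly the inputs where Python A raises IndexError: some accessed
-- grid[x]/grid[x][y]/grid[x][y][z] with x,y,z < n is out of range.
def Pre_compute_views (grid : List (List (List Int))) (n : Int) : Prop :=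
  n ≤ (grid.length : Int) ∧
    ∀ row ∈ grid.take n.toNat, n ≤ (row.length : Int) ∧
      ∀ col ∈ row.take n.toNat, n ≤ (col.length : Int)
instance (grid : List (List (List Int))) (n : Int) : Decidable (Pre_compute_views grid n) := by
  unfold Pre_compute_views; infer_instance

def pvWitness_compute_views : List (List (List Int)) × Int := ([[[1, 0], [0, 0]], [[0, 0], [0, 1]]], 2)

def Spec_compute_views (grid : List (List (List Int))) (n : Int) (out : List (List Int) × List (List Int) × List (List Int)) : Prop := out = compute_views_alt grid n
instance (grid : List (List (List Int))) (n : Int) (out : List (List Int) × List (List Int) × List (List Int)) : Decidable (Spec_compute_views grid n out) := by unfold Spec_compute_views; infer_instance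

-- ===== CLAIM (what is proved, stated in full; the proofs are below) =====
def Claim_equal_compute_views : Prop := ∀ (grid : List (List (List Int))) (n : Int), Dom_compute_views grid n → Pre_compute_views grid n → Spec_compute_views grid n (compute_views grid n)

-- ===== LEMMAS AND PROOFS =====

-- proof-only helpers
def pvShape (m : Nat) (F : List (List Int)) : Prop :=
  F.length = m ∧ ∀ row ∈ F, row.length = m

def pvOr2 (F : List (List Int)) (P : Nat → Nat → Bool) : List (List Int) :=
  F.mapIdx (fun i row => row.mapIdx (fun k v => if P i k then 1 else v))

def pvStepN (G : Nat → Nat → Nat → Int)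
    (s : List (List Int) × List (List Int) × List (List Int)) (t : Nat × Nat × Nat) :
    List (List Int) × List (List Int) × List (List Int) :=
  if G t.1 t.2.1 t.2.2 ≠ 0 then
    (pvSet2 s.1 t.1 t.2.2, pvSet2 s.2.1 t.2.1 t.2.2, pvSet2 s.2.2 t.1 t.2.1)
  else s

def pvTrips (m : Nat) : List (Nat × Nat × Nat) :=
  (List.range m).flatMap (fun x => (List.range m).flatMap (fun y =>
    (List.range m).map (fun z => (x, y, z))))

theorem pvOr2_shape {m : Nat} {F : List (List Int)} (h : pvShape m F) (P : Nat → Nat → Bool) :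
    pvShape m (pvOr2 F P) := by
  obtain ⟨h1, h2⟩ := h
  refine ⟨by simp [pvOr2, h1], ?_⟩
  intro row hrow
  rw [List.mem_iff_getElem] at hrow
  obtain ⟨i, hi, hrow⟩ := hrow
  simp only [pvOr2, List.getElem_mapIdx] at hrow
  subst hrow
  simpa using h2 _ (F.getElem_mem (by simpa [pvOr2] using hi))

theorem pvOr2_false (F : List (List Int)) : pvOr2 F (fun _ _ => false) = F := by
  apply List.ext_getElem
  · simp [pvOr2]
  · intro i hi hi'
    simp only [pvOr2, List.getElem_mapIdx]
    apply List.ext_getElem <;> simp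

theorem pvOr2_congr (F : List (List Int)) {P Q : Nat → Nat → Bool}
    (h : ∀ i k, P i k = Q i k) : pvOr2 F P = pvOr2 F Q := by
  have : P = Q := funext fun i => funext fun k => h i k
  rw [this]

theorem pvOr2_pvOr2 (F : List (List Int)) (P Q : Nat → Nat → Bool) :
    pvOr2 (pvOr2 F P) Q = pvOr2 F (fun i k => P i k || Q i k) := by
  apply List.ext_getElem
  · simp [pvOr2]
  · intro i hi hi'
    simp only [pvOr2, List.getElem_mapIdx]
    apply List.ext_getElem
    · simp
    · intro k hk hk'
      simp only [List.getElem_mapIdx]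
      by_cases h1 : P i k <;> by_cases h2 : Q i k <;> simp [h1, h2]

theorem pvSet2_eq_or2 {m : Nat} {F : List (List Int)} (x z : Nat)
    (hF : pvShape m F) (hx : x < m) (hz : z < m) :
    pvSet2 F x z = pvOr2 F (fun i k => x == i && z == k) := by
  obtain ⟨h1, h2⟩ := hF
  have hxF : x < F.length := by omega
  have hgd : F.getD x [] = F[x] := List.getD_eq_getElem F [] hxF
  apply List.ext_getElem
  · simp [pvSet2, pvOr2]
  · intro i hi hi'
    by_cases hix : x = i
    · subst hix
      simp only [pvSet2, pvOr2, List.getElem_set, List.getElem_mapIdx, hgd]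
      apply List.ext_getElem
      · simp
      · intro k hk hk'
        simp only [beq_self_eq_true, Bool.true_and, beq_iff_eq]
        by_cases hzk' : z = k <;> simp [hzk']
    · have hxi : (x == i) = false := by simpa using hix
      simp only [pvSet2, pvOr2, List.getElem_set, List.getElem_mapIdx, if_neg hix, hxi,
        Bool.false_and, Bool.false_eq_true, if_false]
      apply List.ext_getElem <;> simp

theorem pvFold_char (G : Nat → Nat → Nat → Int) (m : Nat) :
    ∀ (L : List (Nat × Nat × Nat)), (∀ t ∈ L, t.1 < m ∧ t.2.1 < m ∧ t.2.2 < m) →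
    ∀ F R T, pvShape m F → pvShape m R → pvShape m T →
    L.foldl (pvStepN G) (F, R, T) =
      (pvOr2 F (fun i k => L.any (fun t => t.1 == i && t.2.2 == k && G t.1 t.2.1 t.2.2 != 0)),
       pvOr2 R (fun i k => L.any (fun t => t.2.1 == i && t.2.2 == k && G t.1 t.2.1 t.2.2 != 0)),
       pvOr2 T (fun i k => L.any (fun t => t.1 == i && t.2.1 == k && G t.1 t.2.1 t.2.2 != 0))) := by
  intro L
  induction L with
  | nil =>
    intro _ F R T _ _ _
    simp [pvOr2_false]
  | cons t L ih =>
    intro hL F R T hF hR hT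
    obtain ⟨htx, hty, htz⟩ := hL t (List.mem_cons_self ..)
    have hL' : ∀ u ∈ L, u.1 < m ∧ u.2.1 < m ∧ u.2.2 < m :=
      fun u hu => hL u (List.mem_cons_of_mem _ hu)
    rw [List.foldl_cons]
    by_cases hG : G t.1 t.2.1 t.2.2 = 0
    · have hstep : pvStepN G (F, R, T) t = (F, R, T) := by
        simp [pvStepN, hG]
      rw [hstep, ih hL' F R T hF hR hT]
      have hb : (G t.1 t.2.1 t.2.2 != 0) = false := by simp [hG]
      refine congrArg₂ _ ?_ (congrArg₂ _ ?_ ?_) <;>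
        · apply pvOr2_congr
          intro i k
          simp [hb]
    · have hb : (G t.1 t.2.1 t.2.2 != 0) = true := by simp [hG]
      have hstep : pvStepN G (F, R, T) t =
          (pvSet2 F t.1 t.2.2, pvSet2 R t.2.1 t.2.2, pvSet2 T t.1 t.2.1) := by
        simp [pvStepN, hG]
      rw [hstep, pvSet2_eq_or2 t.1 t.2.2 hF htx htz, pvSet2_eq_or2 t.2.1 t.2.2 hR hty htz,
        pvSet2_eq_or2 t.1 t.2.1 hT htx hty,
        ih hL' _ _ _ (pvOr2_shape hF _) (pvOr2_shape hR _) (pvOr2_shape hT _)]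
      rw [pvOr2_pvOr2, pvOr2_pvOr2, pvOr2_pvOr2]
      refine congrArg₂ _ ?_ (congrArg₂ _ ?_ ?_) <;>
        · apply pvOr2_congr
          intro i k
          simp only [List.any_cons, hb, Bool.and_true]

theorem pvOr2_replicate (m : Nat) (P : Nat → Nat → Bool) :
    pvOr2 (List.replicate m (List.replicate m (0 : Int))) P =
      (List.range m).map (fun i => (List.range m).map (fun k => if P i k then (1 : Int) else 0)) := by
  apply List.ext_getElem
  · simp [pvOr2]
  · intro i hi hi'
    simp only [pvOr2, List.getElem_mapIdx, List.getElem_map, List.getElem_range,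
      List.getElem_replicate]
    apply List.ext_getElem
    · simp
    · intro k hk hk'
      simp

theorem pvFoldl_flatMap {α β σ : Type} (l : List α) (f : α → List β) (g : σ → β → σ) (s : σ) :
    (l.flatMap f).foldl g s = l.foldl (fun s a => (f a).foldl g s) s := by
  induction l generalizing s with
  | nil => rfl
  | cons a l ih => simp [List.flatMap_cons, List.foldl_append, ih]

theorem pvTriple_foldl {σ : Type} (step : σ → (Nat × Nat × Nat) → σ) (m : Nat) (init : σ) :
    (pvTrips m).foldl step init =
      (List.range m).foldl (fun s x => (List.range m).foldl (fun s y =>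
        (List.range m).foldl (fun s z => step s (x, y, z)) s) s) init := by
  simp [pvTrips, pvFoldl_flatMap, List.foldl_map]

theorem pvMem_trips (m : Nat) : ∀ t ∈ pvTrips m, t.1 < m ∧ t.2.1 < m ∧ t.2.2 < m := by
  intro t ht
  simp only [pvTrips, List.mem_flatMap, List.mem_map, List.mem_range] at ht
  obtain ⟨x, hx, y, hy, z, hz, rfl⟩ := ht
  exact ⟨hx, hy, hz⟩

theorem pvTrips_mem (m x y z : Nat) (hx : x < m) (hy : y < m) (hz : z < m) :
    (x, y, z) ∈ pvTrips m := by
  apply List.mem_flatMap.mpr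
  exact ⟨x, List.mem_range.mpr hx, List.mem_flatMap.mpr
    ⟨y, List.mem_range.mpr hy, List.mem_map.mpr ⟨z, List.mem_range.mpr hz, rfl⟩⟩⟩

theorem pvShape_init (m : Nat) : pvShape m (List.replicate m (List.replicate m (0 : Int))) := by
  refine ⟨by simp, ?_⟩
  intro row hrow
  rw [List.eq_of_mem_replicate hrow]
  simp

theorem pvAny_front (G : Nat → Nat → Nat → Int) (m i k : Nat) (hi : i < m) (hk : k < m) :
    (pvTrips m).any (fun t => t.1 == i && t.2.2 == k && G t.1 t.2.1 t.2.2 != 0) =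
      (List.range m).any (fun y => G i y k != 0) := by
  rw [Bool.eq_iff_iff]
  simp only [List.any_eq_true, List.mem_range]
  constructor
  · rintro ⟨t, ht, hp⟩
    obtain ⟨hx, hy, hz⟩ := pvMem_trips m t ht
    simp only [Bool.and_eq_true, beq_iff_eq, bne_iff_ne, ne_eq] at hp
    obtain ⟨⟨h1, h2⟩, h3⟩ := hp
    subst h1; subst h2
    exact ⟨t.2.1, hy, by simpa using h3⟩
  · rintro ⟨y, hy, hG⟩
    exact ⟨(i, y, k), pvTrips_mem m i y k hi hy hk, by simpa using hG⟩

theorem pvAny_right (G : Nat → Nat → Nat → Int) (m i k : Nat) (hi : i < m) (hk : k < m) :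
    (pvTrips m).any (fun t => t.2.1 == i && t.2.2 == k && G t.1 t.2.1 t.2.2 != 0) =
      (List.range m).any (fun x => G x i k != 0) := by
  rw [Bool.eq_iff_iff]
  simp only [List.any_eq_true, List.mem_range]
  constructor
  · rintro ⟨t, ht, hp⟩
    obtain ⟨hx, hy, hz⟩ := pvMem_trips m t ht
    simp only [Bool.and_eq_true, beq_iff_eq, bne_iff_ne, ne_eq] at hp
    obtain ⟨⟨h1, h2⟩, h3⟩ := hp
    subst h1; subst h2
    exact ⟨t.1, hx, by simpa using h3⟩
  · rintro ⟨x, hx, hG⟩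
    exact ⟨(x, i, k), pvTrips_mem m x i k hx hi hk, by simpa using hG⟩

theorem pvAny_top (G : Nat → Nat → Nat → Int) (m i k : Nat) (hi : i < m) (hk : k < m) :
    (pvTrips m).any (fun t => t.1 == i && t.2.1 == k && G t.1 t.2.1 t.2.2 != 0) =
      (List.range m).any (fun z => G i k z != 0) := by
  rw [Bool.eq_iff_iff]
  simp only [List.any_eq_true, List.mem_range]
  constructor
  · rintro ⟨t, ht, hp⟩
    obtain ⟨hx, hy, hz⟩ := pvMem_trips m t ht
    simp only [Bool.and_eq_true, beq_iff_eq, bne_iff_ne, ne_eq] at hp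
    obtain ⟨⟨h1, h2⟩, h3⟩ := hp
    subst h1; subst h2
    exact ⟨t.2.2, hz, by simpa using h3⟩
  · rintro ⟨z, hz, hG⟩
    exact ⟨(i, k, z), pvTrips_mem m i k z hi hk hz, by simpa using hG⟩

theorem pvRange_cast (n : Int) :
    PySem.List.pyRange 0 n 1 = (List.range n.toNat).map (fun (k : Nat) => (k : Int)) := by
  rw [PySem.List.pyRange_one]
  have h : n - 0 = n := by ring
  rw [h]
  apply List.map_congr_left
  intro k _
  omega

-- ===== VERDICT (by name: the statement is the Claim_ definition above) =====
theorem compute_views_spec : Claim_equal_compute_views := by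
  intro grid n _hdom _hpre
  unfold Spec_compute_views
  set m := n.toNat with hm
  set G : Nat → Nat → Nat → Int := fun x y z => pvGet3 grid (x : Int) (y : Int) (z : Int) with hG
  have hA : compute_views grid n =
      (pvTrips m).foldl (pvStepN G)
        (List.replicate m (List.replicate m (0 : Int)),
         List.replicate m (List.replicate m (0 : Int)),
         List.replicate m (List.replicate m (0 : Int))) := by
    rw [pvTriple_foldl]
    simp only [compute_views, pvRange_cast, List.foldl_map, pvStepN, hG, Int.toNat_natCast, hm]
  have hB : compute_views_alt grid n =
      ((List.range m).map (fun x => (List.range m).map (fun z =>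
          if (List.range m).any (fun y => G x y z != 0) then (1 : Int) else 0)),
       (List.range m).map (fun y => (List.range m).map (fun z =>
          if (List.range m).any (fun x => G x y z != 0) then (1 : Int) else 0)),
       (List.range m).map (fun x => (List.range m).map (fun y =>
          if (List.range m).any (fun z => G x y z != 0) then (1 : Int) else 0))) := by
    simp only [compute_views_alt, pvRange_cast, List.map_map, List.any_map, Function.comp_def, hG, hm]
  rw [hA, hB,
    pvFold_char G m (pvTrips m) (pvMem_trips m) _ _ _ (pvShape_init m) (pvShape_init m) (pvShape_init m)]
  refine congrArg₂ _ ?_ (congrArg₂ _ ?_ ?_)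
  · rw [pvOr2_replicate]
    apply List.map_congr_left
    intro i hi
    apply List.map_congr_left
    intro k hk
    rw [pvAny_front G m i k (List.mem_range.mp hi) (List.mem_range.mp hk)]
  · rw [pvOr2_replicate]
    apply List.map_congr_left
    intro i hi
    apply List.map_congr_left
    intro k hk
    rw [pvAny_right G m i k (List.mem_range.mp hi) (List.mem_range.mp hk)]
  · rw [pvOr2_replicate]
    apply List.map_congr_left
    intro i hi
    apply List.map_congr_left
    intro k hk
    rw [pvAny_top G m i k (List.mem_range.mp hi) (List.mem_range.mp hk)]
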